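-- pv_equiv track=rewrite | github.com/Darknivht/pdf-research-assistant | backend/ingest.py | _estimate_chunk_page
-- ===== SOURCE A (Python) =====
-- from typing import List, Dict, Any, Tuple
--
-- def _estimate_chunk_page(chunk: str, page_texts: List[Tuple[int, str]]) -> int:
--     """Estimate which page a chunk belongs to based on text matching."""
--     if not page_texts:
--         return 1
--
--     best_match_page = 1
--     max_overlap = 0
--
--     chunk_words = set(chunk.lower().split())
--
--     for page_num, page_text in page_texts:
--         page_words = set(page_text.lower().split())
--         overlap = len(chunk_words.intersection(page_words))
--
--         if overlap > max_overlap: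
--             max_overlap = overlap
--             best_match_page = page_num
--
--     return best_match_page
-- ===== SOURCE B (Python) =====
-- from typing import List, Tuple
--
-- def _estimate_chunk_page(chunk: str, page_texts: List[Tuple[int, str]]) -> int:
--     """Estimate which page a chunk belongs to based on text matching."""
--     # Inverted index: word -> list of entry positions whose text contains it.
--     index = {}
--     for i, (_, text) in enumerate(page_texts):
--         for w in set(text.lower().split()):
--             index.setdefault(w, []).append(i)
--
--     # Each distinct chunk word votes once for every entry it occurs in,
--     # so votes[i] is entry i's distinct-word overlap with the chunk.
--     votes = {}
--     for w in set(chunk.lower().split()):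
--         for i in index.get(w, []):
--             votes[i] = votes.get(i, 0) + 1
--
--     # Earliest entry with strictly more votes than anything before; default 1.
--     best_page, best_votes = 1, 0
--     for i, (page_num, _) in enumerate(page_texts):
--         v = votes.get(i, 0)
--         if v > best_votes:
--             best_page, best_votes = page_num, v
--     return best_page
-- ===== Notes on version B (the rewrite author's own statement) =====
-- stated objective: alternative
-- what changed: B builds an inverted index mapping each word to the list of entry positions containing it, lets each distinct chunk word vote for those positions in a counter dict, and then selects the earliest entry whose vote count strictly exceeds all earlier ones (default 1), instead of A's per-page set-intersection with a running argmax.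
import Mathlib
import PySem

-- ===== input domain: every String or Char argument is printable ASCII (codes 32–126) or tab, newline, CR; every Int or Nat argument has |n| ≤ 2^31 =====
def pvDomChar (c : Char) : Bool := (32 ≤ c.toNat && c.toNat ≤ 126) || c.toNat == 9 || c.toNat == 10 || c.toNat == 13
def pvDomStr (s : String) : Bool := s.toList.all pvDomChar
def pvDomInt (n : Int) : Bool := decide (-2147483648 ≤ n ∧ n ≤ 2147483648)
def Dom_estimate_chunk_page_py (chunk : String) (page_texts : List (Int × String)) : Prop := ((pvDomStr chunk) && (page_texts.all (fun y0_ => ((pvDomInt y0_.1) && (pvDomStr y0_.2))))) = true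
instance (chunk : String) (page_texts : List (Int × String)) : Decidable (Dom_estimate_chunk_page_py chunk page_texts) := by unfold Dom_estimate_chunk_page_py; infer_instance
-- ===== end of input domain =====

-- B replaces A's per-page set-intersection scan by an inverted index (word -> entry positions) plus per-chunk-word voting; same results, alternative algorithm.


-- set(text.lower().split()) — used by both Pythons
def pvWordset (s : String) : List (List Char) :=
  PySem.Set.ofList (PySem.Chars.split₀ (PySem.Chars.lower s.toList))

-- ===== PORT A =====
def estimate_chunk_page_py (chunk : String) (page_texts : List (Int × String)) : Int :=
  if page_texts = [] then 1
  else
    let chunk_words : PySem.Set (List Char) := pvWordset chunk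
    (page_texts.foldl (fun (st : Int × Int) pt =>
        let page_words : PySem.Set (List Char) := pvWordset pt.2
        let overlap : Int := PySem.Set.len (PySem.Set.inter chunk_words page_words)
        if overlap > st.2 then (pt.1, overlap) else st) (1, 0)).1

-- ===== PORT B =====
def estimate_chunk_page_py_alt (chunk : String) (page_texts : List (Int × String)) : Int :=
  -- inverted index: word -> list of entry positions whose text contains it
  let index : PySem.Dict (List Char) (List Int) :=
    (PySem.List.enumerate page_texts).foldl (fun d ip =>
      (pvWordset ip.2.2).foldl (fun d w => d.modify w [] (· ++ [ip.1])) d) PySem.Dict.empty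
  -- each distinct chunk word votes once for every entry it occurs in
  let votes : PySem.Dict Int Int :=
    (pvWordset chunk).foldl (fun v w =>
      (index.getD w []).foldl (fun v i => v.modify i 0 (· + 1)) v) PySem.Dict.empty
  -- earliest entry with strictly more votes than anything before; default 1
  ((PySem.List.enumerate page_texts).foldl (fun (st : Int × Int) ip =>
      let v := votes.getD ip.1 0
      if v > st.2 then (ip.2.1, v) else st) (1, 0)).1

-- ===== PRECONDITION & SPEC =====
def Spec_estimate_chunk_page_py (chunk : String) (page_texts : List (Int × String)) (out : Int) : Prop := out = estimate_chunk_page_py_alt chunk page_texts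
instance (chunk : String) (page_texts : List (Int × String)) (out : Int) : Decidable (Spec_estimate_chunk_page_py chunk page_texts out) := by unfold Spec_estimate_chunk_page_py; infer_instance

-- ===== CLAIM (what is proved, stated in full; the proofs are below) =====
def Claim_equal_estimate_chunk_page_py : Prop := ∀ (chunk : String) (page_texts : List (Int × String)), Dom_estimate_chunk_page_py chunk page_texts → Spec_estimate_chunk_page_py chunk page_texts (estimate_chunk_page_py chunk page_texts)

-- ===== LEMMAS AND PROOFS =====

-- proof-only names for B's two tables
def pvIndex (pts : List (Int × String)) : PySem.Dict (List Char) (List Int) :=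
  (PySem.List.enumerate pts).foldl (fun d ip =>
    (pvWordset ip.2.2).foldl (fun d w => d.modify w [] (· ++ [ip.1])) d) PySem.Dict.empty

def pvVotes (chunk : String) (pts : List (Int × String)) : PySem.Dict Int Int :=
  (pvWordset chunk).foldl (fun v w =>
    ((pvIndex pts).getD w []).foldl (fun v i => v.modify i 0 (· + 1)) v) PySem.Dict.empty

-- A's per-entry overlap score
def pvScore (cw : List (List Char)) (pt : Int × String) : Int :=
  PySem.Set.len (PySem.Set.inter cw (pvWordset pt.2))

lemma pvWordset_nodup (s : String) : (pvWordset s).Nodup :=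
  PySem.Set.nodup_ofList _

-- A's intersection count is the number of chunk words occurring in the page's word set
lemma pvScore_eq_countP (cw : List (List Char)) (pt : Int × String) :
    pvScore cw pt = ((cw.countP (fun w => decide (w ∈ pvWordset pt.2))) : Int) := by
  unfold pvScore
  rw [List.countP_eq_length_filter]
  simp only [PySem.Set.len, PySem.Set.inter]
  congr 2
  apply List.filter_congr
  intro x _
  rw [Bool.eq_iff_iff]
  simp [PySem.Set.contains]

-- one entry's contribution to the inverted index
lemma pv_index_inner (ws : List (List Char)) (hnd : ws.Nodup)
    (d : PySem.Dict (List Char) (List Int)) (i : Int) (w : List Char) :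
    ((ws.foldl (fun d w' => d.modify w' [] (· ++ [i])) d).getD w [])
      = d.getD w [] ++ (if w ∈ ws then [i] else []) := by
  have h : ws.foldl (fun d w' => d.modify w' [] (· ++ [i])) d
      = (ws.map (fun w' => (w', i))).foldl (fun d p => d.modify p.1 [] (· ++ [p.2])) d := by
    rw [List.foldl_map]
  rw [h, PySem.Dict.getD_foldl_modify_append]
  congr 1
  rw [List.filter_map, List.map_map]
  simp only [Function.comp_def]
  have hf : (ws.filter (fun w' => (w', i).1 == w)) = ws.filter (· == w) := rfl
  rw [hf, List.filter_beq]
  by_cases hm : w ∈ ws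
  · rw [List.count_eq_one_of_mem hnd hm]; simp [hm]
  · rw [List.count_eq_zero_of_not_mem hm]; simp [hm]

-- the full index: entry positions whose text contains w, in order
lemma pv_index (l : List (Int × (Int × String))) (d : PySem.Dict (List Char) (List Int)) (w : List Char) :
    ((l.foldl (fun d ip => (pvWordset ip.2.2).foldl (fun d w' => d.modify w' [] (· ++ [ip.1])) d) d).getD w [])
      = d.getD w [] ++ (l.filter (fun ip => decide (w ∈ pvWordset ip.2.2))).map (·.1) := by
  induction l generalizing d with
  | nil => simp
  | cons ip rest ih =>
    rw [List.foldl_cons, ih, pv_index_inner _ (pvWordset_nodup _)]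
    by_cases hm : w ∈ pvWordset ip.2.2
    · simp [hm]
    · simp [hm]

lemma pv_index_getD (pts : List (Int × String)) (w : List Char) :
    (pvIndex pts).getD w []
      = ((PySem.List.enumerate pts).filter (fun ip => decide (w ∈ pvWordset ip.2.2))).map (·.1) := by
  unfold pvIndex
  rw [pv_index]
  simp

-- accumulated votes: one per occurrence of j in a looked-up index list
lemma pv_votes (l : List (List Char)) (g : List Char → List Int) (v : PySem.Dict Int Int) (j : Int) :
    ((l.foldl (fun v w => (g w).foldl (fun v i => v.modify i 0 (· + 1)) v) v).getD j 0)
      = v.getD j 0 + ((l.map (fun w => ((g w).count j : Int))).sum) := by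
  induction l generalizing v with
  | nil => simp
  | cons w rest ih =>
    rw [List.foldl_cons, ih, PySem.Dict.getD_foldl_modify_add_one]
    simp only [List.map_cons, List.sum_cons]
    ring

-- position k appears in w's index list exactly when w is in entry k's word set
lemma pv_count_idx (pts : List (Int × String)) (w : List Char) (k : Nat) (hk : k < pts.length) :
    (((PySem.List.enumerate pts).filter (fun ip => decide (w ∈ pvWordset ip.2.2))).map (·.1)).count ((k : Nat) : Int)
      = if w ∈ pvWordset (pts[k].2) then 1 else 0 := by
  have h1 : List.Pairwise (fun p q : Int × (Int × String) => p.1 < q.1)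
      ((PySem.List.enumerate pts).filter (fun ip => decide (w ∈ pvWordset ip.2.2))) :=
    (PySem.List.pairwise_lt_enumerate pts 0).sublist List.filter_sublist
  have hnd : (((PySem.List.enumerate pts).filter (fun ip => decide (w ∈ pvWordset ip.2.2))).map (·.1)).Nodup := by
    rw [List.Nodup, List.pairwise_map]
    exact h1.imp (fun h => ne_of_lt h)
  have hmem : ((k : Nat) : Int) ∈ (((PySem.List.enumerate pts).filter (fun ip => decide (w ∈ pvWordset ip.2.2))).map (·.1))
      ↔ w ∈ pvWordset (pts[k].2) := by
    rw [List.mem_map]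
    constructor
    · rintro ⟨ip, hip, hfst⟩
      rw [List.mem_filter] at hip
      obtain ⟨hin, hp⟩ := hip
      rw [PySem.List.mem_enumerate_iff] at hin
      obtain ⟨m, hm, rfl⟩ := hin
      simp only [zero_add] at hfst
      have hmk : m = k := by exact_mod_cast hfst
      subst hmk
      simpa using hp
    · intro hw
      refine ⟨(((k : Nat) : Int), pts[k]), ?_, rfl⟩
      rw [List.mem_filter, PySem.List.mem_enumerate_iff]
      exact ⟨⟨k, hk, by simp⟩, by simpa using hw⟩
  by_cases hw : w ∈ pvWordset (pts[k].2)
  · rw [if_pos hw, List.count_eq_one_of_mem hnd (hmem.mpr hw)]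
  · rw [if_neg hw, List.count_eq_zero_of_not_mem (fun h => hw (hmem.mp h))]

-- the vote table read at position k is entry k's score
lemma pv_votes_eq_score (chunk : String) (pts : List (Int × String)) (k : Nat) (hk : k < pts.length) :
    (pvVotes chunk pts).getD ((0 : Int) + (k : Nat)) 0 = pvScore (pvWordset chunk) pts[k] := by
  unfold pvVotes
  rw [pv_votes, PySem.Dict.getD_empty, zero_add, zero_add]
  have hcnt : (pvWordset chunk).map (fun w => ((((pvIndex pts).getD w []).count ((k : Nat) : Int)) : Int))
      = (pvWordset chunk).map (fun w => if (decide (w ∈ pvWordset (pts[k].2))) = true then 1 else 0) := by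
    apply List.map_congr_left
    intro w _
    rw [pv_index_getD, pv_count_idx pts w k hk]
    by_cases h : w ∈ pvWordset (pts[k].2)
    · simp [h]
    · simp [h]
  rw [hcnt, PySem.List.sum_map_ite_one_zero, pvScore_eq_countP]

-- B's final selection fold equals A's fold when the vote table matches the scores
lemma pv_final (pts : List (Int × String)) (f : Int → Int) (score : Int × String → Int)
    (s : Int) (st : Int × Int)
    (h : ∀ k (hk : k < pts.length), f (s + k) = score pts[k]) :
    ((PySem.List.enumerate pts s).foldl (fun st ip => if f ip.1 > st.2 then (ip.2.1, f ip.1) else st) st)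
      = pts.foldl (fun st pt => if score pt > st.2 then (pt.1, score pt) else st) st := by
  induction pts generalizing s st with
  | nil => simp [PySem.List.enumerate]
  | cons p rest ih =>
    rw [PySem.List.enumerate_cons, List.foldl_cons, List.foldl_cons]
    have h0 : f s = score p := by simpa using h 0 (by simp)
    rw [h0]
    exact ih (s + 1) _ (fun k hk => by
      have hs := h (k + 1) (by simpa using Nat.succ_lt_succ hk)
      have : s + 1 + (k : Int) = s + ((k : Nat) + 1 : Nat) := by push_cast; ring
      rw [this]
      simpa using hs)

-- ===== VERDICT (by name: the statement is the Claim_ definition above) =====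
theorem estimate_chunk_page_py_spec : Claim_equal_estimate_chunk_page_py := by
  unfold Claim_equal_estimate_chunk_page_py
  intro chunk pts _
  unfold Spec_estimate_chunk_page_py estimate_chunk_page_py estimate_chunk_page_py_alt
  cases pts with
  | nil => rfl
  | cons p rest =>
    rw [if_neg (by simp : ¬ (p :: rest = []))]
    exact (congrArg Prod.fst (pv_final (p :: rest)
      (fun i => (pvVotes chunk (p :: rest)).getD i 0)
      (fun pt => pvScore (pvWordset chunk) pt) 0 (1, 0)
      (fun k hk => pv_votes_eq_score chunk (p :: rest) k hk))).symm
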